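-- pv_equiv track=rewrite | github.com/Arturchek10/python-labs | лаба2/laba2.py | search_matches
-- ===== SOURCE A (Python) =====
-- def search_matches(str1:str, str2:str) :
--
--     matches = 0
--     minLen = min(len(str1),len(str2))
--
--     for i in range(minLen-1):
--         substring1 = str1[i:i+2]
--         substring2 = str2[i:i+2]
--
--         if substring1 == substring2:
--             matches += 1
--
--     return f'matches {matches}'
-- ===== SOURCE B (Python) =====
-- def search_matches(str1: str, str2: str):
--     eq = [a == b for a, b in zip(str1, str2)]
--     matches = sum(1 for x, y in zip(eq, eq[1:]) if x and y)
--     return f'matches {matches}'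
-- ===== Notes on version B (the rewrite author's own statement) =====
-- stated objective: alternative
-- what changed: Replaces the indexed loop comparing 2-char slices with a two-stage index-free pass: a per-character equality table from zip(str1, str2), then counting adjacent True pairs via zip(eq, eq[1:]).
import Mathlib
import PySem

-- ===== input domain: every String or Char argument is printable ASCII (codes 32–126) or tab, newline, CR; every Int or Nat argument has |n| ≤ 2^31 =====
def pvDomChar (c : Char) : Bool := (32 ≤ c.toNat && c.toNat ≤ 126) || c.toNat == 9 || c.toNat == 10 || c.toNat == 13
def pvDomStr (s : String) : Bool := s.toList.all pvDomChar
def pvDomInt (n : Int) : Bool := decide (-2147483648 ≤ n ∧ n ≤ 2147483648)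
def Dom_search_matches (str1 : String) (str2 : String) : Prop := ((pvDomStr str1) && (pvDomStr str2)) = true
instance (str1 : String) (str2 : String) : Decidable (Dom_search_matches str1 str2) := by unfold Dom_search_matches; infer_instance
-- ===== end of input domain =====

-- B replaces A's indexed loop over 2-char slices by an index-free two-stage pass:
-- a per-character equality table (zipWith) and a count of adjacent True pairs (zip with the tail).


-- ===== PORT A =====
def search_matches (str1 : String) (str2 : String) : String :=
  let matchCount : Int := 0
  let minLen : Int := min (PySem.Str.len str1) (PySem.Str.len str2)
  let matchCount := (PySem.List.pyRange 0 (minLen - 1) 1).foldl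
    (fun matchCount i =>
      let substring1 := PySem.Str.slice str1 (some i) (some (i + 2))
      let substring2 := PySem.Str.slice str2 (some i) (some (i + 2))
      if substring1 == substring2 then matchCount + 1 else matchCount) matchCount
  "matches " ++ PySem.Int.toStr matchCount

-- ===== PORT B =====
def search_matches_alt (str1 : String) (str2 : String) : String :=
  let eq := List.zipWith (fun a b => a == b) str1.toList str2.toList
  let matchCount : Int := (eq.zip (PySem.List.slice eq (some 1) none)).foldl
    (fun acc p => if p.1 && p.2 then acc + 1 else acc) 0
  "matches " ++ PySem.Int.toStr matchCount

-- ===== PRECONDITION & SPEC =====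
def Spec_search_matches (str1 : String) (str2 : String) (out : String) : Prop := out = search_matches_alt str1 str2
instance (str1 : String) (str2 : String) (out : String) : Decidable (Spec_search_matches str1 str2 out) := by unfold Spec_search_matches; infer_instance

-- ===== CLAIM (what is proved, stated in full; the proofs are below) =====
def Claim_equal_search_matches : Prop := ∀ (str1 : String) (str2 : String), Dom_search_matches str1 str2 → Spec_search_matches str1 str2 (search_matches str1 str2)

-- ===== LEMMAS AND PROOFS =====

-- a 0/1-counting foldl is countP
theorem foldl_if_count {α : Type} (p : α → Bool) (l : List α) (acc : Int) :
    l.foldl (fun m x => if p x then m + 1 else m) acc = acc + l.countP p := by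
  induction l generalizing acc with
  | nil => simp
  | cons a t ih =>
    simp only [List.foldl_cons, List.countP_cons, ih]
    by_cases h : p a = true <;> simp [h] <;> ring

theorem str_eq_iff (s t : String) : s = t ↔ s.toList = t.toList := String.ext_iff

-- zip of a list with its tail, written by index
theorem zip_tail_eq_map_range {α : Type} (d : α) (bs : List α) :
    bs.zip bs.tail = (List.range (bs.length - 1)).map (fun k => (bs.getD k d, bs.getD (k+1) d)) := by
  apply List.ext_getElem
  · simp [List.length_zip, List.length_tail]
  · intro i h1 h2
    have hlen : i < bs.length - 1 := by
      simp [List.length_zip, List.length_tail] at h1; omega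
    simp only [List.getElem_zip, List.getElem_map, List.getElem_range, List.getElem_tail]
    rw [List.getD_eq_getElem bs d (by omega : i < bs.length),
        List.getD_eq_getElem bs d (by omega : i + 1 < bs.length)]

-- two-element window of a list
theorem take_two_drop {α : Type} (l : List α) (k : Nat) (h : k + 1 < l.length) :
    (l.drop k).take 2 = [l[k], l[k+1]] := by
  rw [List.drop_eq_getElem_cons (by omega : k < l.length), List.drop_eq_getElem_cons h]
  rfl

-- core: the two counts agree, stated on lists
theorem counts_agree (l1 l2 : List Char) :
    (PySem.List.pyRange 0 (min (l1.length : Int) (l2.length : Int) - 1) 1).countP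
      (fun i => PySem.List.slice l1 (some i) (some (i + 2)) == PySem.List.slice l2 (some i) (some (i + 2)))
    = ((List.zipWith (fun a b => a == b) l1 l2).zip (List.zipWith (fun a b => a == b) l1 l2).tail).countP
      (fun p => p.1 && p.2) := by
  set eqs := List.zipWith (fun a b => a == b) l1 l2 with heq
  have hlen : eqs.length = min l1.length l2.length := by simp [heq]
  have hm : (min (l1.length : Int) (l2.length : Int) - 1).toNat = eqs.length - 1 := by
    rw [hlen]; omega
  rw [zip_tail_eq_map_range false eqs, List.countP_map,
      PySem.List.pyRange_one, List.countP_map]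
  simp only [Int.sub_zero, hm]
  apply List.countP_congr
  intro k hk
  rw [List.mem_range] at hk
  have hk1 : k + 1 < l1.length := by omega
  have hk2 : k + 1 < l2.length := by omega
  have h2 : ((k : Int) + 2) = ((k : Int) + ((2 : Nat) : Int)) := by norm_num
  simp only [Function.comp, Int.zero_add, h2, PySem.List.slice_natCast_add]
  rw [take_two_drop l1 k hk1, take_two_drop l2 k hk2,
      List.getD_eq_getElem eqs false (by omega), List.getD_eq_getElem eqs false (by omega)]
  simp only [heq, List.getElem_zipWith]
  rw [Bool.eq_iff_iff]
  simp

-- ===== VERDICT (by name: the statement is the Claim_ definition above) =====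
theorem search_matches_spec : Claim_equal_search_matches := by
  intro str1 str2 _
  unfold Spec_search_matches search_matches search_matches_alt
  simp only [PySem.Str.len_eq, PySem.List.slice_from_one]
  rw [foldl_if_count, foldl_if_count]
  simp only [Int.zero_add]
  congr 1
  congr 1
  have := counts_agree str1.toList str2.toList
  rw [← this]
  congr 1
  apply List.countP_congr
  intro i _
  rw [Bool.eq_iff_iff]
  simp only [beq_iff_eq, str_eq_iff, PySem.Str.toList_slice]
  constructor <;> intro h <;> simpa using h
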